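-- pv_equiv track=rewrite | github.com/folkertvanheusden/DotXT | tests/flags.py | flags_sar
-- ===== SOURCE A (Python) =====
-- parity_lookup = [ False ] * 256
--
-- def parity(v):
--     return parity_lookup[v]
--
-- def flags_sar(val: int, count: int, carry: int, width: int, set_flag_o: bool):
--     check_bit = 32768 if width == 16 else 128
--
--     add_bit = check_bit if (val & check_bit) != 0 else 0
--
--     for i in range(0, count):
--         carry = True if val & 1 else False
--         val >>= 1
--         val |= add_bit
--
--     flag_s = flag_z = flag_p = flag_o = False
--     mask = ~(2048 | 16)
--
--     if count >= 1:
--         flag_s = True if val & check_bit else 0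
--         flag_z = val == 0
--         flag_p = parity(val & 255)
--
--     flags = (1 if carry else 0) + (2048 if flag_o else 0) + (64 if flag_z else 0) + (128 if flag_s else 0) + (4 if flag_p else 0)
--
--     return (val, flags, mask & 0xffff)
-- ===== SOURCE B (Python) =====
-- def _sar_shifted(val, k, check_bit):
--     # value after k steps of "shift right once, OR the sign-fill bit back in"
--     v = val >> k
--     if k >= 1 and (val & check_bit) != 0:
--         v |= 2 * check_bit - max(check_bit >> (k - 1), 1)
--     return v
--
-- def flags_sar(val: int, count: int, carry: int, width: int, set_flag_o: bool):
--     check_bit = 32768 if width == 16 else 128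
--     if count < 1:
--         return (val, (1 if carry else 0), 0xf7ef)
--     v = _sar_shifted(val, count, check_bit)
--     c = _sar_shifted(val, count - 1, check_bit) & 1
--     flags = c + (64 if v == 0 else 0) + (128 if (v & check_bit) != 0 else 0)
--     return (v, flags, 0xf7ef)
-- ===== Notes on version B (the rewrite author's own statement) =====
-- stated objective: faster
-- what changed: Replaced the O(count) shift-one-bit-at-a-time loop by a closed-form O(1) computation: result = (val >> count) OR'ed with a sign-fill mask 2*check_bit - max(check_bit >> (count-1), 1), and carry = bit 0 of the value after count-1 steps, computed the same closed way.
import Mathlib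
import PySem

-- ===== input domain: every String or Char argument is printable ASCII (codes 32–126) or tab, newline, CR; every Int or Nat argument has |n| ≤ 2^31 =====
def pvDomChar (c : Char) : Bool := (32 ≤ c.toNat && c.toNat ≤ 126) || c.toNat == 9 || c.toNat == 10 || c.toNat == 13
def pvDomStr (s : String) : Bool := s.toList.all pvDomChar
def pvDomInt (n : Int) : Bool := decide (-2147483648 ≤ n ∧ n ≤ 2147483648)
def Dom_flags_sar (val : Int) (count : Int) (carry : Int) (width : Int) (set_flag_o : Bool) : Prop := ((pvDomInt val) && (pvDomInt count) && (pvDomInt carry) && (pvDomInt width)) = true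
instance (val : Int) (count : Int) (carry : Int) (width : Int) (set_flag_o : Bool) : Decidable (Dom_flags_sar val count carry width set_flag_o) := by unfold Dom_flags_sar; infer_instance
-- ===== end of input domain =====

-- B replaces A's O(count) shift-one-bit-per-iteration loop by a closed-form O(1) computation
-- (arithmetic shift plus a sign-fill mask); equivalence of the RETURN value is proved for all inputs.

-- ===== PORT A =====
-- parity_lookup = [False] * 256; parity(v) = parity_lookup[v].  The only call site passes
-- val & 255 ∈ [0,255], always in range, so the IndexError branch (none) is unreachable;
-- `getD false` is exact there (and the list holds only `false` anyway).
def pvParityLookup : List Bool := List.replicate 256 false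
def pvParity (v : Int) : Bool := (PySem.List.pyGet? pvParityLookup v).getD false

-- Python's loop-carried `carry` becomes a bool (True/False) inside the loop; it is only ever
-- read for truthiness, so it is carried here as Int 1/0 — exact for the returned flags.
def flags_sar (val : Int) (count : Int) (carry : Int) (width : Int) (set_flag_o : Bool) : List Int :=
  let check_bit : Int := if width = 16 then 32768 else 128
  let add_bit : Int := if PySem.Int.band val check_bit ≠ 0 then check_bit else 0
  let st : Int × Int := (PySem.List.pyRange 0 count 1).foldl
    (fun s _ =>
      ((if PySem.Int.band s.2 1 ≠ 0 then 1 else 0), PySem.Int.bor (s.2 >>> (1 : Nat)) add_bit))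
    (carry, val)
  let carry1 := st.1
  let val1 := st.2
  let flag_s : Bool := if 1 ≤ count then decide (PySem.Int.band val1 check_bit ≠ 0) else false
  let flag_z : Bool := if 1 ≤ count then decide (val1 = 0) else false
  let flag_p : Bool := if 1 ≤ count then pvParity (PySem.Int.band val1 255) else false
  let flag_o : Bool := false
  let flags : Int := (if carry1 ≠ 0 then 1 else 0) + (if flag_o then 2048 else 0)
    + (if flag_z then 64 else 0) + (if flag_s then 128 else 0) + (if flag_p then 4 else 0)
  [val1, flags, PySem.Int.band (Int.not (PySem.Int.bor 2048 16)) 65535]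

-- ===== PORT B =====
-- _sar_shifted(val, k, check_bit): value after k steps of "shift right once, OR the sign fill
-- back in", computed in O(1).  k ≥ 0 at both call sites (count ≥ 1), so k.toNat is exact.
def pvSarShifted (val : Int) (k : Int) (check_bit : Int) : Int :=
  let v := val >>> k.toNat
  if 1 ≤ k ∧ PySem.Int.band val check_bit ≠ 0 then
    PySem.Int.bor v (2 * check_bit - max (check_bit >>> (k - 1).toNat) 1)
  else v

def flags_sar_alt (val : Int) (count : Int) (carry : Int) (width : Int) (set_flag_o : Bool) : List Int :=
  let check_bit : Int := if width = 16 then 32768 else 128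
  if count < 1 then [val, if carry ≠ 0 then 1 else 0, 63471]
  else
    let v := pvSarShifted val count check_bit
    let c := PySem.Int.band (pvSarShifted val (count - 1) check_bit) 1
    [v, c + (if v = 0 then 64 else 0) + (if PySem.Int.band v check_bit ≠ 0 then 128 else 0), 63471]

-- ===== PRECONDITION & SPEC =====
def Spec_flags_sar (val : Int) (count : Int) (carry : Int) (width : Int) (set_flag_o : Bool) (out : List Int) : Prop := out = flags_sar_alt val count carry width set_flag_o
instance (val : Int) (count : Int) (carry : Int) (width : Int) (set_flag_o : Bool) (out : List Int) : Decidable (Spec_flags_sar val count carry width set_flag_o out) := by unfold Spec_flags_sar; infer_instance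

-- ===== CLAIM (what is proved, stated in full; the proofs are below) =====
def Claim_equal_flags_sar : Prop := ∀ (val : Int) (count : Int) (carry : Int) (width : Int) (set_flag_o : Bool), Dom_flags_sar val count carry width set_flag_o → Spec_flags_sar val count carry width set_flag_o (flags_sar val count carry width set_flag_o)

-- ===== LEMMAS AND PROOFS =====

-- ---- generic bit toolkit over Int (Python's infinite two's complement) ----

theorem pvSubAndEqLdiff (n m : Nat) : n - (n &&& m) = n.ldiff m := by
  induction n using Nat.binaryRec generalizing m with
  | zero =>
    have h0 : (0 : Nat).ldiff m = 0 := by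
      apply Nat.eq_of_testBit_eq; intro i
      simp [Nat.testBit_ldiff]
    simp [Nat.zero_and, h0]
  | bit b n ih =>
    have hm := Nat.bit_testBit_zero_shiftRight_one m
    rw [← hm, Nat.land_bit, Nat.ldiff_bit]
    have hle : n &&& (m >>> 1) ≤ n := Nat.and_le_left
    have := ih (m >>> 1)
    cases b <;> cases hb : m.testBit 0 <;>
      simp [Nat.bit, ← this] <;> omega

theorem pvEqOfTestBitEq {a b : Int} (h : ∀ i, a.testBit i = b.testBit i) : a = b := by
  cases a with
  | ofNat n =>
    cases b with
    | ofNat m =>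
      have : n = m := Nat.eq_of_testBit_eq (by intro i; simpa [Int.testBit] using h i)
      simp [this]
    | negSucc m =>
      exfalso
      have hi := h (max n m)
      have h1 : n.testBit (max n m) = false :=
        Nat.testBit_lt_two_pow (lt_of_le_of_lt (Nat.le_max_left n m)
          (lt_of_lt_of_le Nat.lt_two_pow_self (Nat.pow_le_pow_right (by norm_num) (le_refl _))))
      have h2 : m.testBit (max n m) = false :=
        Nat.testBit_lt_two_pow (lt_of_le_of_lt (Nat.le_max_right n m) Nat.lt_two_pow_self)
      simp [Int.testBit, h1, h2] at hi
  | negSucc n =>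
    cases b with
    | ofNat m =>
      exfalso
      have hi := h (max n m)
      have h1 : n.testBit (max n m) = false :=
        Nat.testBit_lt_two_pow (lt_of_le_of_lt (Nat.le_max_left n m) Nat.lt_two_pow_self)
      have h2 : m.testBit (max n m) = false :=
        Nat.testBit_lt_two_pow (lt_of_le_of_lt (Nat.le_max_right n m) Nat.lt_two_pow_self)
      simp [Int.testBit, h1, h2] at hi
    | negSucc m =>
      have : n = m := Nat.eq_of_testBit_eq (by
        intro i
        have := h i
        simpa [Int.testBit] using this)
      simp [this]

theorem pvTestBitBor (a b : Int) (i : Nat) :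
    (PySem.Int.bor a b).testBit i = (a.testBit i || b.testBit i) := by
  have hns : ∀ m : Nat, ¬ (0 : Int) ≤ Int.negSucc m := by
    intro m; exact not_le.mpr (Int.negSucc_lt_zero m)
  have htn : ∀ m : Nat, (-(Int.negSucc m) - 1).toNat = m := by
    intro m; rw [Int.negSucc_eq]; omega
  have hofn : ∀ n : Nat, (0 : Int) ≤ Int.ofNat n := fun n => Int.natCast_nonneg n
  have htoN : ∀ n : Nat, (Int.ofNat n).toNat = n := fun n => rfl
  cases a with
  | ofNat n =>
    cases b with
    | ofNat m =>
      rw [show PySem.Int.bor (Int.ofNat n) (Int.ofNat m) = ((n ||| m : Nat) : Int) by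
        simp only [PySem.Int.bor, if_pos (hofn n), if_pos (hofn m), htoN]]
      simp [Int.testBit, Nat.testBit_or]
    | negSucc m =>
      rw [show PySem.Int.bor (Int.ofNat n) (Int.negSucc m) = Int.negSucc (m.ldiff n) by
        simp only [PySem.Int.bor, if_pos (hofn n), if_neg (hns m), htn, htoN, pvSubAndEqLdiff]
        rw [Int.negSucc_eq]; omega]
      simp only [Int.testBit, Nat.testBit_ldiff]
      cases n.testBit i <;> cases m.testBit i <;> rfl
  | negSucc n =>
    cases b with
    | ofNat m =>
      rw [show PySem.Int.bor (Int.negSucc n) (Int.ofNat m) = Int.negSucc (n.ldiff m) by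
        simp only [PySem.Int.bor, if_neg (hns n), if_pos (hofn m), htn, htoN, pvSubAndEqLdiff]
        rw [Int.negSucc_eq]; omega]
      simp only [Int.testBit, Nat.testBit_ldiff]
      cases n.testBit i <;> cases m.testBit i <;> rfl
    | negSucc m =>
      rw [show PySem.Int.bor (Int.negSucc n) (Int.negSucc m) = Int.negSucc (n &&& m) by
        simp only [PySem.Int.bor, if_neg (hns n), if_neg (hns m), htn]
        rw [Int.negSucc_eq]; omega]
      simp only [Int.testBit, Nat.testBit_and]
      cases n.testBit i <;> cases m.testBit i <;> rfl

theorem pvTestBitShiftRight (a : Int) (k i : Nat) :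
    (a >>> k).testBit i = a.testBit (k + i) := by
  cases a with
  | ofNat n =>
    rw [show (Int.ofNat n) >>> k = Int.ofNat (n >>> k) from (Int.natCast_shiftRight n k).symm]
    simp [Int.testBit, Nat.testBit_shiftRight]
  | negSucc n =>
    rw [Int.negSucc_shiftRight]
    simp [Int.testBit, Nat.testBit_shiftRight]

-- ---- the sign-fill mask ----

def pvHmaskN (p k : Nat) : Nat := 2 ^ (p + 1) - 2 ^ (p + 1 - min k (p + 1))

theorem pvHmaskEq (p k : Nat) (hk : 1 ≤ k) :
    2 * ((2 ^ p : Nat) : Int) - max (((2 ^ p : Nat) : Int) >>> (k - 1)) 1 = ((pvHmaskN p k : Nat) : Int) := by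
  rw [show ((2 ^ p : Nat) : Int) >>> (k - 1) = (((2 ^ p : Nat) >>> (k - 1) : Nat) : Int) from
    (Int.natCast_shiftRight _ _).symm]
  rw [Nat.shiftRight_eq_div_pow]
  unfold pvHmaskN
  by_cases h : k ≤ p + 1
  · have h1 : k - 1 ≤ p := by omega
    rw [Nat.pow_div h1 (by norm_num)]
    have hmin : min k (p + 1) = k := by omega
    rw [hmin]
    have h2 : (1 : Int) ≤ ((2 ^ (p - (k - 1)) : Nat) : Int) := by
      exact_mod_cast Nat.one_le_two_pow
    rw [max_eq_left h2]
    have h3 : p + 1 - k = p - (k - 1) := by omega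
    rw [h3]
    have h4 : (2 : Nat) ^ (p - (k - 1)) ≤ 2 ^ (p + 1) := Nat.pow_le_pow_right (by norm_num) (by omega)
    push_cast [h4]
    rw [pow_succ]
    ring
  · have h1 : (2 : Nat) ^ p < 2 ^ (k - 1) := Nat.pow_lt_pow_right (by norm_num) (by omega)
    rw [Nat.div_eq_of_lt h1]
    have hmin : min k (p + 1) = p + 1 := by omega
    rw [hmin]
    simp only [Nat.sub_self, pow_zero]
    have h4 : (1 : Nat) ≤ 2 ^ (p + 1) := Nat.one_le_two_pow
    push_cast [h4]
    rw [pow_succ]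
    norm_num
    ring

theorem pvTestBitHmaskN (p k i : Nat) :
    (pvHmaskN p k).testBit i = decide (p + 1 - min k (p + 1) ≤ i ∧ i < p + 1) := by
  unfold pvHmaskN
  set e := p + 1 - min k (p + 1) with he
  have hle : e ≤ p + 1 := by omega
  have hfac : 2 ^ (p + 1) - 2 ^ e = (2 ^ (p + 1 - e) - 1) * 2 ^ e := by
    have hee : p + 1 - e + e = p + 1 := by omega
    rw [Nat.sub_one_mul, ← Nat.pow_add, hee]
  rw [hfac, Nat.testBit_mul_two_pow, Nat.testBit_two_pow_sub_one]
  rw [Bool.eq_iff_iff]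
  simp only [Bool.and_eq_true, decide_eq_true_eq]
  omega

-- ---- the loop of A, characterised ----

theorem pvFoldlConst {α β : Type} (l : List α) (f : β → β) (s : β) :
    l.foldl (fun s _ => f s) s = f^[l.length] s := by
  induction l generalizing s with
  | nil => rfl
  | cons a l ih => simpa [Function.iterate_succ_apply] using ih (f s)

theorem pvPyRangeLen (count : Int) : (PySem.List.pyRange 0 count 1).length = count.toNat := by
  unfold PySem.List.pyRange
  norm_num
  omega

theorem pvPairIter (ab : Int) (c v : Int) (n : Nat) :
    (fun (s : Int × Int) =>
      ((if PySem.Int.band s.2 1 ≠ 0 then (1 : Int) else 0), PySem.Int.bor (s.2 >>> (1 : Nat)) ab))^[n] (c, v)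
    = (if n = 0 then c else
        (if PySem.Int.band ((fun w => PySem.Int.bor (w >>> (1 : Nat)) ab)^[n - 1] v) 1 ≠ 0 then 1 else 0),
       (fun w => PySem.Int.bor (w >>> (1 : Nat)) ab)^[n] v) := by
  induction n generalizing c v with
  | zero => rfl
  | succ n ih =>
    rw [Function.iterate_succ_apply, ih]
    cases n with
    | zero => simp
    | succ m =>
      simp only [Nat.succ_ne_zero, if_false, Nat.succ_sub_one]
      simp only [← Function.iterate_succ_apply]
      rfl

-- value after m iterations = the closed form of B
theorem pvIterEqSar (p : Nat) (val : Int) (m : Nat) :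
    (fun w => PySem.Int.bor (w >>> (1 : Nat))
        (if PySem.Int.band val ((2 ^ p : Nat) : Int) ≠ 0 then ((2 ^ p : Nat) : Int) else 0))^[m] val
    = pvSarShifted val (m : Int) ((2 ^ p : Nat) : Int) := by
  set cb : Int := ((2 ^ p : Nat) : Int) with hcb
  by_cases hneg : PySem.Int.band val cb ≠ 0
  · have hif : (if PySem.Int.band val cb ≠ 0 then cb else (0 : Int)) = cb := if_pos hneg
    simp only [hif]
    induction m with
    | zero =>
      simp [pvSarShifted]
    | succ n ih =>
      rcases Nat.eq_zero_or_pos n with hn | hn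
      · subst hn
        rw [Function.iterate_succ_apply, Function.iterate_zero_apply]
        unfold pvSarShifted
        rw [if_pos ⟨by norm_num, hneg⟩]
        have hcb1 : (1 : Int) ≤ cb := by
          rw [hcb]; exact_mod_cast Nat.one_le_two_pow
        have e1 : ((((0 : Nat) + 1 : Nat) : Int)).toNat = 1 := by norm_num
        have e2 : ((((0 : Nat) + 1 : Nat) : Int) - 1).toNat = 0 := by norm_num
        rw [e1, e2, Int.shiftRight_zero, max_eq_left hcb1,
          show 2 * cb - cb = cb from by ring]
      · rw [Function.iterate_succ_apply', ih]
        unfold pvSarShifted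
        rw [if_pos ⟨by exact_mod_cast hn, hneg⟩, if_pos ⟨by exact_mod_cast (by omega : 1 ≤ n + 1), hneg⟩]
        simp only [Int.toNat_natCast]
        have hsub : ((n : Int) - 1).toNat = n - 1 := by omega
        have hsub2 : ((((n + 1 : Nat)) : Int) - 1).toNat = n := by push_cast; omega
        rw [hcb, hsub, pvHmaskEq p n hn]
        have hmk := pvHmaskEq p (n + 1) (by omega)
        rw [Nat.add_sub_cancel] at hmk
        rw [hsub2, hmk]
        apply pvEqOfTestBitEq
        intro i
        rw [pvTestBitBor, pvTestBitShiftRight, pvTestBitBor, pvTestBitShiftRight, pvTestBitBor]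
        have ht1 : (((pvHmaskN p n : Nat) : Int)).testBit (1 + i) = (pvHmaskN p n).testBit (1 + i) := by
          simp [Int.testBit]
        have ht2 : (((pvHmaskN p (n + 1) : Nat) : Int)).testBit i = (pvHmaskN p (n + 1)).testBit i := by
          simp [Int.testBit]
        have ht3 : (((2 ^ p : Nat) : Int)).testBit i = decide (p = i) := by
          simp [Int.testBit, Nat.testBit_two_pow]
        rw [ht1, ht2, ht3, pvTestBitHmaskN, pvTestBitHmaskN]
        rw [pvTestBitShiftRight, show n + (1 + i) = n + 1 + i from by omega]
        rw [Bool.eq_iff_iff]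
        simp only [Bool.or_eq_true, decide_eq_true_eq]
        constructor
        · rintro ((h | h) | h)
          · left; exact h
          · right; omega
          · right; omega
        · rintro (h | h)
          · left; left; exact h
          · rcases Nat.lt_or_ge i p with hip | hip
            · left; right; omega
            · right; omega
  · rw [if_neg hneg]
    have hb0 : ∀ w : Int, PySem.Int.bor (w >>> (1 : Nat)) 0 = w >>> (1 : Nat) := fun w =>
      PySem.Int.bor_zero _
    have hiter : ∀ n : Nat, (fun w : Int => PySem.Int.bor (w >>> (1 : Nat)) 0)^[n] val = val >>> n := by
      intro n
      induction n with
      | zero => simp [Int.shiftRight_zero]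
      | succ k ihk =>
        rw [Function.iterate_succ_apply', ihk, hb0, ← Int.shiftRight_add]
    rw [hiter]
    unfold pvSarShifted
    rw [if_neg (by tauto)]
    simp

-- chi v = v & 1
theorem pvChiEqBandOne (v : Int) :
    (if PySem.Int.band v 1 ≠ 0 then (1 : Int) else 0) = PySem.Int.band v 1 := by
  have h := PySem.Int.band_one v
  have h1 : 0 ≤ PySem.Int.mod v 2 := PySem.Int.mod_nonneg v (by norm_num)
  have h2 : PySem.Int.mod v 2 < 2 := PySem.Int.mod_lt v (by norm_num)
  rw [h]
  split <;> omega

theorem pvParityFalse (v : Int) : pvParity v = false := by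
  unfold pvParity pvParityLookup
  rcases h : PySem.List.pyGet? (List.replicate 256 false) v with _ | b
  · rfl
  · have hb : b ∈ List.replicate 256 false := by
      unfold PySem.List.pyGet? at h
      rcases ho : PySem.List.pyIdx? (List.replicate 256 false).length v with _ | k
      · rw [ho] at h
        rw [show ((none : Option Nat).bind fun k => (List.replicate 256 false)[k]?) = none from rfl] at h
        cases h
      · rw [ho] at h
        exact List.mem_of_getElem? h
    have hbf := List.eq_of_mem_replicate hb
    subst hbf
    rfl

-- ===== VERDICT (by name: the statement is the Claim_ definition above) =====
theorem flags_sar_spec : Claim_equal_flags_sar := by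
  unfold Claim_equal_flags_sar Spec_flags_sar
  intro val count carry width so _
  have hcb : ∃ p : Nat, (if width = 16 then (32768 : Int) else 128) = ((2 ^ p : Nat) : Int) := by
    by_cases h : width = 16
    · exact ⟨15, by rw [if_pos h]; norm_num⟩
    · exact ⟨7, by rw [if_neg h]; norm_num⟩
  obtain ⟨p, hp⟩ := hcb
  simp only [flags_sar, flags_sar_alt, hp]
  rw [pvFoldlConst, pvPyRangeLen, pvPairIter]
  by_cases hc : count < 1
  · have h0 : count.toNat = 0 := by omega
    rw [if_pos hc, h0]
    simp only [if_neg (by omega : ¬ (1 : Int) ≤ count)]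
    norm_num
    decide
  · have hn : 1 ≤ count.toNat := by omega
    have hcnt : ((count.toNat : Nat) : Int) = count := by omega
    rw [if_neg hc]
    simp only [if_neg (by omega : ¬ count.toNat = 0), if_pos (by omega : (1 : Int) ≤ count)]
    rw [pvIterEqSar, pvIterEqSar, hcnt]
    have hprev : ((count.toNat - 1 : Nat) : Int) = count - 1 := by push_cast [hn]; omega
    rw [hprev]
    rw [pvChiEqBandOne, pvChiEqBandOne]
    simp only [pvParityFalse]
    norm_num
    decide
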